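-- pv_equiv track=rewrite | github.com/ashuping/python3-string-exercise-1 | analyze_data_solution.py | get_insights
-- ===== SOURCE A (Python) =====
-- def get_insights(data):
--     vanilla_fans, mint_choco_fans, strawberry_fans, meat_fans = 0, 0, 0, 0
--
--     '''
--         Go through the input data and count up how many dragons liked each
--         flavor of ice cream. Save the results in the variables defined above.
--     '''
--     for result in data:
--         if result[1] == 'vanilla':
--             vanilla_fans += 1
--         elif result[1] == 'mint choco':
--             mint_choco_fans += 1
--         elif result[1] == 'strawberry':
--             strawberry_fans += 1
--         elif result[1] == 'meat':
--             meat_fans += 1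
--
--     return {'vanilla':vanilla_fans,'mint_choco':mint_choco_fans,"strawberry":strawberry_fans,'meat':meat_fans}
-- ===== SOURCE B (Python) =====
-- def get_insights(data):
--     flavors = [result[1] for result in data]
--     return {'vanilla': flavors.count('vanilla'),
--             'mint_choco': flavors.count('mint choco'),
--             'strawberry': flavors.count('strawberry'),
--             'meat': flavors.count('meat')}
-- ===== Notes on version B (the rewrite author's own statement) =====
-- stated objective: idiomatic
-- what changed: Replaced the four-accumulator if/elif counting loop by projecting the flavor column once and tallying each of the four flavors with list.count, eliminating the branch chain and the mutable counters.
import Mathlib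
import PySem

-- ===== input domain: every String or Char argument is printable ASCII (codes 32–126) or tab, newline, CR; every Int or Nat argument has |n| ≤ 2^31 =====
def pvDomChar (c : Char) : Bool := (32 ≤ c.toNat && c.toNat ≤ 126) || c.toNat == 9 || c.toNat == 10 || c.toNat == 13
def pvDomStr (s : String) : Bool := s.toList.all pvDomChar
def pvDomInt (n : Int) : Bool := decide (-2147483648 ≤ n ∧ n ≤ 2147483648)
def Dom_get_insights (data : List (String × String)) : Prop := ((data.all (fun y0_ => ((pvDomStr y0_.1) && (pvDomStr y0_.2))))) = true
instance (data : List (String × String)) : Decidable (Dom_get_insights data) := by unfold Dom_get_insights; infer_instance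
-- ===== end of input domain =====

-- B replaces A's four-accumulator if/elif loop by a flavor-column projection plus four list.count tallies (idiomatic; same O(n) cost).

-- ===== PORT A =====
-- the if/elif chain over the four counters, as a fold carrying the 4-tuple of counters
def get_insights (data : List (String × String)) : List (String × Int) :=
  let s := data.foldl (fun (acc : Int × Int × Int × Int) result =>
    if result.2 == "vanilla" then (acc.1 + 1, acc.2.1, acc.2.2.1, acc.2.2.2)
    else if result.2 == "mint choco" then (acc.1, acc.2.1 + 1, acc.2.2.1, acc.2.2.2)
    else if result.2 == "strawberry" then (acc.1, acc.2.1, acc.2.2.1 + 1, acc.2.2.2)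
    else if result.2 == "meat" then (acc.1, acc.2.1, acc.2.2.1, acc.2.2.2 + 1)
    else acc) (0, 0, 0, 0)
  [("vanilla", s.1), ("mint_choco", s.2.1), ("strawberry", s.2.2.1), ("meat", s.2.2.2)]

-- ===== PORT B =====
def get_insights_alt (data : List (String × String)) : List (String × Int) :=
  let flavors := data.map (fun result => result.2)
  [("vanilla", (PySem.List.count flavors "vanilla" : Int)),
   ("mint_choco", (PySem.List.count flavors "mint choco" : Int)),
   ("strawberry", (PySem.List.count flavors "strawberry" : Int)),
   ("meat", (PySem.List.count flavors "meat" : Int))]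

-- ===== PRECONDITION & SPEC =====
def Spec_get_insights (data : List (String × String)) (out : List (String × Int)) : Prop := out = get_insights_alt data
instance (data : List (String × String)) (out : List (String × Int)) : Decidable (Spec_get_insights data out) := by unfold Spec_get_insights; infer_instance

-- ===== CLAIM (what is proved, stated in full; the proofs are below) =====
def Claim_equal_get_insights : Prop := ∀ (data : List (String × String)), Dom_get_insights data → Spec_get_insights data (get_insights data)

-- ===== LEMMAS AND PROOFS =====
-- A's fold adds each flavor's count to the starting accumulator
theorem get_insights_fold_eq (data : List (String × String)) (v m s me : Int) :
    data.foldl (fun (acc : Int × Int × Int × Int) result =>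
      if result.2 == "vanilla" then (acc.1 + 1, acc.2.1, acc.2.2.1, acc.2.2.2)
      else if result.2 == "mint choco" then (acc.1, acc.2.1 + 1, acc.2.2.1, acc.2.2.2)
      else if result.2 == "strawberry" then (acc.1, acc.2.1, acc.2.2.1 + 1, acc.2.2.2)
      else if result.2 == "meat" then (acc.1, acc.2.1, acc.2.2.1, acc.2.2.2 + 1)
      else acc) (v, m, s, me)
    = (v + ((data.map (fun r => r.2)).count "vanilla" : Int),
       m + ((data.map (fun r => r.2)).count "mint choco" : Int),
       s + ((data.map (fun r => r.2)).count "strawberry" : Int),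
       me + ((data.map (fun r => r.2)).count "meat" : Int)) := by
  induction data generalizing v m s me with
  | nil => simp
  | cons hd tl ih =>
    simp only [List.foldl_cons, List.map_cons, List.count_cons]
    split_ifs with h1 h2 h3 h4 <;>
      simp_all [beq_iff_eq] <;> ring

-- ===== VERDICT (by name: the statement is the Claim_ definition above) =====
theorem get_insights_spec : Claim_equal_get_insights := by
  intro data _
  unfold Spec_get_insights get_insights get_insights_alt
  simp only [get_insights_fold_eq, PySem.List.count_eq, zero_add]
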